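-- pv_equiv track=rewrite | github.com/JonathanGupton/advent_of_code | y2018/day7.py | make_adjacency_dicts
-- ===== SOURCE A (Python) =====
-- from collections import defaultdict
--
-- def make_adjacency_dicts(step_pairs: list[tuple[str, str]]) -> tuple[defaultdict[str, list[str]], defaultdict[str, list[str]]]:
--     node_outgoing = defaultdict(list)
--     node_incoming = defaultdict(list)
--     for pair in step_pairs:
--         node_outgoing[pair[0]].append(pair[1])
--         node_incoming[pair[1]].append(pair[0])
--     for k in node_outgoing:
--         node_outgoing[k] = sorted(node_outgoing[k])
--     for k in node_incoming:
--         node_incoming[k] = sorted(node_incoming[k])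
--     return node_outgoing, node_incoming
-- ===== SOURCE B (Python) =====
-- from collections import defaultdict
--
-- def make_adjacency_dicts(step_pairs):
--     # group-by decomposition: one pass per distinct key, each bucket built
--     # sorted directly via a filtering comprehension (no mutate-then-resort)
--     node_outgoing = defaultdict(list)
--     node_incoming = defaultdict(list)
--     for k in dict.fromkeys(pair[0] for pair in step_pairs):
--         node_outgoing[k] = sorted(pair[1] for pair in step_pairs if pair[0] == k)
--     for k in dict.fromkeys(pair[1] for pair in step_pairs):
--         node_incoming[k] = sorted(pair[0] for pair in step_pairs if pair[1] == k)
--     return node_outgoing, node_incoming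
-- ===== Notes on version B (the rewrite author's own statement) =====
-- stated objective: alternative
-- what changed: Replaces A's incremental append-per-pair dict build followed by a re-sort of every bucket with a declarative group-by: one loop over the distinct keys (dict.fromkeys) that builds each bucket directly as sorted(filter of the pairs).
import Mathlib
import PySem

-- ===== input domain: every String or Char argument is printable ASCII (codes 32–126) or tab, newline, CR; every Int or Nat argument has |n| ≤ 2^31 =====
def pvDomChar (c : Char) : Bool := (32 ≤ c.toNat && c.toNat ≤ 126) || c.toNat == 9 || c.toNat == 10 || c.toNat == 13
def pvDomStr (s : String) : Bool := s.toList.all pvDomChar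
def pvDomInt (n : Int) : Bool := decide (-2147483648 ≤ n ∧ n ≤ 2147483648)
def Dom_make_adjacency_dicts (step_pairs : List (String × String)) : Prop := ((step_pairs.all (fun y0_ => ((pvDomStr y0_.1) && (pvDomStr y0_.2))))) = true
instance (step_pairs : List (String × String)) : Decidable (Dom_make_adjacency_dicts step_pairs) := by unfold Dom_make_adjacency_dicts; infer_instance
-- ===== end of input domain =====

-- B replaces A's append-per-pair build plus per-bucket re-sort with one loop over the
-- distinct keys building each bucket directly as sorted(filter); same return value.

-- ===== PORT A =====
def make_adjacency_dicts (step_pairs : List (String × String)) : (List (String × List String)) × (List (String × List String)) :=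
  -- node_outgoing/node_incoming built by appending per pair (defaultdict(list))
  let node_outgoing := step_pairs.foldl (fun d pair => d.modify pair.1 [] (fun v => v ++ [pair.2])) PySem.Dict.empty
  let node_incoming := step_pairs.foldl (fun d pair => d.modify pair.2 [] (fun v => v ++ [pair.1])) PySem.Dict.empty
  -- for k in node_outgoing: node_outgoing[k] = sorted(node_outgoing[k])
  let node_outgoing := node_outgoing.keys.foldl
    (fun d k => d.insert k (PySem.List.sorted (d.getD k []) (fun x => x) false)) node_outgoing
  let node_incoming := node_incoming.keys.foldl
    (fun d k => d.insert k (PySem.List.sorted (d.getD k []) (fun x => x) false)) node_incoming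
  (node_outgoing.items, node_incoming.items)

-- ===== PORT B =====
def make_adjacency_dicts_alt (step_pairs : List (String × String)) : (List (String × List String)) × (List (String × List String)) :=
  -- for k in dict.fromkeys(...): node_outgoing[k] = sorted(pair[1] for pair in step_pairs if pair[0] == k)
  let node_outgoing := (PySem.List.dedup (step_pairs.map (fun pair => pair.1))).foldl
    (fun d k => d.insert k (PySem.List.sorted ((step_pairs.filter (fun pair => pair.1 == k)).map (fun pair => pair.2)) (fun x => x) false))
    PySem.Dict.empty
  let node_incoming := (PySem.List.dedup (step_pairs.map (fun pair => pair.2))).foldl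
    (fun d k => d.insert k (PySem.List.sorted ((step_pairs.filter (fun pair => pair.2 == k)).map (fun pair => pair.1)) (fun x => x) false))
    PySem.Dict.empty
  (node_outgoing.items, node_incoming.items)

-- ===== PRECONDITION & SPEC =====
def Spec_make_adjacency_dicts (step_pairs : List (String × String)) (out : (List (String × List String)) × (List (String × List String))) : Prop := out = make_adjacency_dicts_alt step_pairs
instance (step_pairs : List (String × String)) (out : (List (String × List String)) × (List (String × List String))) : Decidable (Spec_make_adjacency_dicts step_pairs out) := by unfold Spec_make_adjacency_dicts; infer_instance

-- ===== CLAIM (what is proved, stated in full; the proofs are below) =====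
def Claim_equal_make_adjacency_dicts : Prop := ∀ (step_pairs : List (String × String)), Dom_make_adjacency_dicts step_pairs → Spec_make_adjacency_dicts step_pairs (make_adjacency_dicts step_pairs)

-- ===== LEMMAS AND PROOFS =====

-- A's second loop: resorting each bucket of a dict over its own keys maps `sorted` over the values.
lemma sortpass_items (l : List String) (d : PySem.Dict String (List String))
    (hnd : d.keys.Nodup) (hl : l.Nodup) (hsub : ∀ k ∈ l, d.contains k = true) :
    (l.foldl (fun d k => d.insert k (PySem.List.sorted (d.getD k []) (fun x => x) false)) d).items
      = d.items.map (fun p => if p.1 ∈ l then (p.1, PySem.List.sorted p.2 (fun x => x) false) else p) := by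
  induction l generalizing d with
  | nil => simp
  | cons k t ih =>
    have hk : d.contains k = true := hsub k (by simp)
    have hkeys : (d.insert k (PySem.List.sorted (d.getD k []) (fun x => x) false)).keys = d.keys :=
      PySem.Dict.keys_insert_of_contains _ _ hk
    have hnd' : (d.insert k (PySem.List.sorted (d.getD k []) (fun x => x) false)).keys.Nodup := by
      rw [hkeys]; exact hnd
    have hsub' : ∀ k' ∈ t, (d.insert k (PySem.List.sorted (d.getD k []) (fun x => x) false)).contains k' = true := by
      intro k' hk'
      rw [PySem.Dict.contains_insert]
      simp [hsub k' (by simp [hk'])]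
    rw [List.foldl_cons, ih _ hnd' (hl.of_cons) hsub',
        PySem.Dict.items_insert_of_contains _ _ hk, List.map_map]
    apply List.map_congr_left
    intro p hp
    have hkt : k ∉ t := (List.nodup_cons.mp hl).1
    by_cases hpk : p.1 = k
    · have hval : d.getD k [] = p.2 := by
        have : (k, p.2) ∈ d.items := by
          have : (p.1, p.2) ∈ d.items := by simpa using hp
          rwa [hpk] at this
        exact PySem.Dict.getD_of_mem_items d this hnd []
      simp [Function.comp, hpk, hval, hkt]
    · simp [Function.comp, hpk, List.mem_cons]

-- A's build loop plus sort pass equals the grouped, per-key sorted characterisation.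
lemma grouped_items (l : List (String × String)) :
    ((l.foldl (fun d p => d.modify p.1 [] (fun v => v ++ [p.2])) PySem.Dict.empty).keys.foldl
        (fun d k => d.insert k (PySem.List.sorted (d.getD k []) (fun x => x) false))
        (l.foldl (fun d p => d.modify p.1 [] (fun v => v ++ [p.2])) PySem.Dict.empty)).items
      = (PySem.List.dedup (l.map (fun p => p.1))).map
          (fun k => (k, PySem.List.sorted ((l.filter (fun p => p.1 == k)).map (fun p => p.2)) (fun x => x) false)) := by
  set D := l.foldl (fun d p => d.modify p.1 [] (fun v => v ++ [p.2])) PySem.Dict.empty with hD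
  have hkeys : D.keys = PySem.Set.ofList (l.map (fun p => p.1)) := by
    rw [hD, PySem.Dict.keys_foldl_modify_key]
    simp [PySem.Set.update_nil_left]
  have hnd : D.keys.Nodup := by
    rw [hkeys]; exact PySem.Set.nodup_ofList _
  have hgetD : ∀ k, D.getD k [] = (l.filter (fun p => p.1 == k)).map (fun p => p.2) := by
    intro k
    rw [hD, PySem.Dict.getD_foldl_modify_append]
    simp
  have hitems : D.items = D.keys.map (fun k => (k, D.getD k [])) :=
    PySem.Dict.items_eq_map_keys D hnd []
  rw [sortpass_items D.keys D hnd hnd (fun k hk => (PySem.Dict.contains_iff_mem_keys _ _).mpr hk),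
      hitems, List.map_map, PySem.List.dedup_eq_ofList, ← hkeys]
  apply List.map_congr_left
  intro k hk
  simp [Function.comp, hk, hgetD k]

-- B's build loop over the distinct keys is just the map it writes down.
lemma fresh_items (ks : List String) (f : String → List String) (h : ks.Nodup) :
    (ks.foldl (fun d k => d.insert k (f k)) PySem.Dict.empty).items = ks.map (fun k => (k, f k)) := by
  have := PySem.Dict.items_foldl_insert_fresh (l := ks) (k := fun a => a) (v := f)
    (d := PySem.Dict.empty) (by intro a _; exact PySem.Dict.contains_empty a) (by simpa using h)
  simpa using this

-- the incoming dict is the outgoing construction on the swapped pairs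
lemma swap_foldl (l : List (String × String)) :
    l.foldl (fun d (p : String × String) => d.modify p.2 ([] : List String) (fun v => v ++ [p.1])) PySem.Dict.empty
      = (l.map Prod.swap).foldl (fun d p => d.modify p.1 [] (fun v => v ++ [p.2])) PySem.Dict.empty := by
  rw [List.foldl_map]; rfl

lemma swap_filter (l : List (String × String)) (k : String) :
    ((l.map Prod.swap).filter (fun p => p.1 == k)).map (fun p => p.2)
      = (l.filter (fun p => p.2 == k)).map (fun p => p.1) := by
  rw [List.filter_map, List.map_map]
  rfl

-- ===== VERDICT (by name: the statement is the Claim_ definition above) =====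
theorem make_adjacency_dicts_spec : Claim_equal_make_adjacency_dicts := by
  intro step_pairs _
  unfold Spec_make_adjacency_dicts make_adjacency_dicts make_adjacency_dicts_alt
  dsimp only
  refine Prod.ext ?_ ?_
  · dsimp only
    rw [grouped_items step_pairs,
        fresh_items _ _ (by rw [PySem.List.dedup_eq_ofList]; exact PySem.Set.nodup_ofList _)]
  · dsimp only
    rw [swap_foldl, grouped_items (step_pairs.map Prod.swap),
        fresh_items _ _ (by rw [PySem.List.dedup_eq_ofList]; exact PySem.Set.nodup_ofList _)]
    have h1 : (step_pairs.map Prod.swap).map (fun p => p.1) = step_pairs.map (fun p => p.2) := by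
      rw [List.map_map]; rfl
    rw [h1]
    apply List.map_congr_left
    intro k _
    rw [swap_filter]
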